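-- pv_equiv track=rewrite | github.com/AngelikiGram/treesformer | inference/ablation.py | bracket_validity
-- ===== SOURCE A (Python) =====
-- def bracket_validity(lstring: str):
--     """Returns (is_balanced: bool, max_depth: int)."""
--     depth = max_depth = 0
--     for ch in lstring:
--         if ch == '[':
--             depth += 1
--             max_depth = max(max_depth, depth)
--         elif ch == ']':
--             depth -= 1
--             if depth < 0:
--                 return False, 0
--     return depth == 0, max_depth
-- ===== SOURCE B (Python) =====
-- def bracket_validity(lstring: str):
--     """Returns (is_balanced: bool, max_depth: int)."""
--     # Matching-stack parser: no depth counter or global running max.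
--     # Each '[' pushes the max nesting seen so far *within the current level*
--     # and starts a fresh level; each ']' pops and combines (1 + inner max).
--     stack = []
--     m = 0
--     for ch in lstring:
--         if ch == '[':
--             stack.append(m)
--             m = 0
--         elif ch == ']':
--             if not stack:
--                 return False, 0
--             m = max(stack.pop(), 1 + m)
--     balanced = not stack
--     while stack:
--         m = max(stack.pop(), 1 + m)
--     return balanced, m
-- ===== Notes on version B (the rewrite author's own statement) =====
-- stated objective: alternative
-- what changed: B replaces A's integer depth counter with a running global max by a matching stack of per-level relative maxima: '[' pushes the current level's max and resets it, ']' pops and combines as max(outer, 1+inner), and leftover open levels are unwound the same way at the end.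
import Mathlib
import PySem

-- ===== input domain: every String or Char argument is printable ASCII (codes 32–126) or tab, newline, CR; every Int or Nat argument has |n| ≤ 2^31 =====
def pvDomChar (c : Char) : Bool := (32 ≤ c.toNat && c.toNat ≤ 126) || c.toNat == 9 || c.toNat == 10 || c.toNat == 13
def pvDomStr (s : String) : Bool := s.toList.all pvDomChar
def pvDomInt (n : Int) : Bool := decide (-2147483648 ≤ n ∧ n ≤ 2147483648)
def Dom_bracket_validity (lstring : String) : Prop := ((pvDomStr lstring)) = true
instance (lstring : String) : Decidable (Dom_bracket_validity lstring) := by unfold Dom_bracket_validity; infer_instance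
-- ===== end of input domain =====

-- B replaces A's depth counter + running global max by a matching stack of
-- per-level relative maxima — an alternative decomposition of the same O(n) task.


-- ===== PORT A =====
-- A's for-loop with early return, carrying (depth, max_depth).
def bvLoopA : List Char → Int → Int → Bool × Int
  | [], depth, maxDepth => (depth == 0, maxDepth)
  | ch :: rest, depth, maxDepth =>
    if ch == '[' then
      bvLoopA rest (depth + 1) (max maxDepth (depth + 1))
    else if ch == ']' then
      if depth - 1 < 0 then (false, 0)
      else bvLoopA rest (depth - 1) maxDepth
    else bvLoopA rest depth maxDepth

def bracket_validity (lstring : String) : Bool × Int :=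
  bvLoopA lstring.toList 0 0

-- ===== PORT B =====
-- the final `while stack: m = max(stack.pop(), 1 + m)` unwind
def bvUnwind : List Int → Int → Int
  | [], m => m
  | s :: rest, m => bvUnwind rest (max s (1 + m))

-- B's for-loop: stack of saved per-level maxima, '[' pushes, ']' pops & combines
def bvLoopB : List Char → List Int → Int → Bool × Int
  | [], stack, m => (stack.isEmpty, bvUnwind stack m)
  | ch :: rest, stack, m =>
    if ch == '[' then bvLoopB rest (m :: stack) 0
    else if ch == ']' then
      match stack with
      | [] => (false, 0)
      | s :: tail => bvLoopB rest tail (max s (1 + m))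
    else bvLoopB rest stack m

def bracket_validity_alt (lstring : String) : Bool × Int :=
  bvLoopB lstring.toList [] 0

-- ===== PRECONDITION & SPEC =====
def Spec_bracket_validity (lstring : String) (out : Bool × Int) : Prop := out = bracket_validity_alt lstring
instance (lstring : String) (out : Bool × Int) : Decidable (Spec_bracket_validity lstring out) := by unfold Spec_bracket_validity; infer_instance

-- ===== CLAIM (what is proved, stated in full; the proofs are below) =====
def Claim_equal_bracket_validity : Prop := ∀ (lstring : String), Dom_bracket_validity lstring → Spec_bracket_validity lstring (bracket_validity lstring)

-- ===== LEMMAS AND PROOFS =====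

-- unwinding a stack of length k from m yields at least m + k
theorem bvUnwind_lower (st : List Int) : ∀ m : Int, m + st.length ≤ bvUnwind st m := by
  induction st with
  | nil => intro m; simp [bvUnwind]
  | cons s rest ih =>
    intro m
    simp only [bvUnwind, List.length_cons]
    have := ih (max s (1 + m))
    omega

-- the invariant connecting B's stack state to A's (depth, max_depth):
-- depth = stack.length, m + depth ≤ M, and
-- ∀ x, bvUnwind stack (max m x) = max M (x + depth)
theorem bv_main (cs : List Char) : ∀ (stack : List Int) (m M : Int),
    m + stack.length ≤ M →
    (∀ x : Int, bvUnwind stack (max m x) = max M (x + stack.length)) →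
    bvLoopB cs stack m = bvLoopA cs stack.length M := by
  induction cs with
  | nil =>
    intro stack m M hle hinv
    simp only [bvLoopB, bvLoopA]
    have h1 : bvUnwind stack m = M := by
      have := hinv m
      rw [max_self] at this
      omega
    have h2 : stack.isEmpty = (((stack.length : Int)) == 0) := by
      cases stack <;> simp <;> omega
    rw [h1, h2]
  | cons c cs ih =>
    intro stack m M hle hinv
    by_cases h1 : c = '['
    · subst h1
      simp only [bvLoopB, bvLoopA, if_pos (by decide : ('[' == '[') = true)]
      have : bvLoopB cs (m :: stack) 0
          = bvLoopA cs ((m :: stack).length) (max M ((stack.length : Int) + 1)) := by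
        apply ih
        · simp only [List.length_cons]; push_cast; omega
        · intro x
          simp only [bvUnwind, List.length_cons]
          have e1 : max m (1 + max 0 x) = max m (max 1 (1 + x)) := by omega
          rw [e1, hinv (max 1 (1 + x))]
          push_cast
          omega
      rw [this]
      simp only [List.length_cons]
      push_cast
      ring_nf
    · by_cases h2 : c = ']'
      · subst h2
        have hne : (']' == '[') = false := by decide
        simp only [bvLoopB, bvLoopA, hne, if_pos (by decide : (']' == ']') = true)]
        cases stack with
        | nil =>
          norm_num
        | cons s tail =>
          have hlen : ((s :: tail).length : Int) - 1 = (tail.length : Int) := by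
            simp
          have hnneg : ¬ ((s :: tail).length : Int) - 1 < 0 := by
            rw [hlen]; omega
          rw [if_neg hnneg, hlen]
          apply ih
          · -- max s (1 + m) + tail.length ≤ M
            have hM : bvUnwind (s :: tail) m = M := by
              have := hinv m
              rw [max_self] at this
              simp only [List.length_cons] at hle this
              omega
            simp only [bvUnwind] at hM
            have := bvUnwind_lower tail (max s (1 + m))
            omega
          · intro x
            have := hinv (x - 1)
            simp only [bvUnwind, List.length_cons] at this
            have e1 : max s (1 + max m (x - 1)) = max (max s (1 + m)) x := by omega
            rw [e1] at this
            rw [this]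
            push_cast
            omega
      · have hc1 : (c == '[') = false := by simp [h1]
        have hc2 : (c == ']') = false := by simp [h2]
        simp only [bvLoopB, bvLoopA, hc1, hc2]
        exact ih stack m M hle hinv

-- ===== VERDICT (by name: the statement is the Claim_ definition above) =====
theorem bracket_validity_spec : Claim_equal_bracket_validity := by
  intro lstring _
  unfold Spec_bracket_validity bracket_validity bracket_validity_alt
  have := bv_main lstring.toList [] 0 0 (by simp) (by intro x; simp [bvUnwind])
  simp only [List.length_nil, Nat.cast_zero] at this
  rw [this]
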